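-- pv_equiv track=rewrite | github.com/p-verburg/advent_of_code_2019 | security/password.py | has_once_repeating_digit
-- ===== SOURCE A (Python) =====
-- def has_once_repeating_digit(password):
--     last_digit = None
--     last_digit_count = 0
--     for digit in password:
--         if digit == last_digit:
--             last_digit_count += 1
--         else:
--             if last_digit_count == 2:
--                 return True
--             last_digit = digit
--             last_digit_count = 1
--     return last_digit_count == 2
-- ===== SOURCE B (Python) =====
-- def has_once_repeating_digit(password):
--     n = len(password)
--     return any(
--         password[i] == password[i + 1]
--         and (i == 0 or password[i - 1] != password[i])
--         and (i + 2 == n or password[i + 2] != password[i])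
--         for i in range(n - 1)
--     )
-- ===== Notes on version B (the rewrite author's own statement) =====
-- stated objective: alternative
-- what changed: B never counts runs or threads last_digit state: it tests each position i locally, returning True iff some i has password[i]==password[i+1] with a different (or absent) neighbour on each side, via any() over range(len(password)-1).
import Mathlib
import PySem

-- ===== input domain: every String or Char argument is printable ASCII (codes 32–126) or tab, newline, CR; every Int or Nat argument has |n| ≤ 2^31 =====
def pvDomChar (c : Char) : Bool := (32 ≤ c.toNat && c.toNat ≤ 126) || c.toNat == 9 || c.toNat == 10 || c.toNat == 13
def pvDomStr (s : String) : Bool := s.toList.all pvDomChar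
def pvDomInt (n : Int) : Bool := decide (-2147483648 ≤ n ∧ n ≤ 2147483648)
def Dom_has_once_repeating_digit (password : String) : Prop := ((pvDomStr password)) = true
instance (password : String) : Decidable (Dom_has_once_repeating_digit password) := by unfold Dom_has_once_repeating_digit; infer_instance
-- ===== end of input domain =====

-- B replaces A's stateful run-counting loop by a positional test: some index i has equal
-- neighbours password[i] == password[i+1] and a different (or absent) character on each side (alternative; same cost).

-- ===== PORT A =====
-- loop over characters with (last_digit, last_digit_count) state; early return on a completed run of 2
def pvLoopA : List Char → Option Char → Nat → Bool
  | [], _, cnt => cnt == 2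
  | d :: rest, last, cnt =>
    if some d == last then pvLoopA rest last (cnt + 1)
    else if cnt == 2 then true
    else pvLoopA rest (some d) 1

def has_once_repeating_digit (password : String) : Bool :=
  pvLoopA password.toList none 0

-- ===== PORT B =====
-- the per-index condition of Source B's generator expression (accesses are exact: Python's
-- password[i] is in range for every access Source B makes, so getD with a dummy default is faithful)
def pvIdxOk (l : List Char) (n i : Nat) : Bool :=
  (l.getD i ' ' == l.getD (i + 1) ' ') &&
  (i == 0 || l.getD (i - 1) ' ' != l.getD i ' ') &&
  (i + 2 == n || l.getD (i + 2) ' ' != l.getD i ' ')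

def has_once_repeating_digit_alt (password : String) : Bool :=
  let l := password.toList
  (List.range (l.length - 1)).any (fun i => pvIdxOk l l.length i)

-- ===== PRECONDITION & SPEC =====
def Spec_has_once_repeating_digit (password : String) (out : Bool) : Prop := out = has_once_repeating_digit_alt password
instance (password : String) (out : Bool) : Decidable (Spec_has_once_repeating_digit password out) := by unfold Spec_has_once_repeating_digit; infer_instance

-- ===== CLAIM (what is proved, stated in full; the proofs are below) =====
def Claim_equal_has_once_repeating_digit : Prop := ∀ (password : String), Dom_has_once_repeating_digit password → Spec_has_once_repeating_digit password (has_once_repeating_digit password)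

-- ===== LEMMAS AND PROOFS =====

-- the index condition with an explicit "previous character" for position 0
def pvIdxOkP (l : List Char) (p? : Option Char) (i : Nat) : Bool :=
  (l.getD i ' ' == l.getD (i + 1) ' ') &&
  ((if i == 0 then p? else some (l.getD (i - 1) ' ')) != some (l.getD i ' ')) &&
  (i + 2 == l.length || l.getD (i + 2) ' ' != l.getD i ' ')

-- recursive sliding-window form of the index scan
def pvRecIdx : Option Char → List Char → Bool
  | _, [] => false
  | _, [_] => false
  | p?, a :: b :: rest =>
    ((a == b) && (p? != some a) && (rest.head? != some a)) || pvRecIdx (some a) (b :: rest)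

def pvLead : Char → List Char → Nat
  | _, [] => 0
  | c, a :: r => if a == c then pvLead c r + 1 else 0

lemma pvBneNone (x : Char) : ((none : Option Char) != some x) = true := rfl

lemma pvBneSome (x y : Char) : ((some x : Option Char) != some y) = (x != y) := by simp [bne]

lemma pvIdxOk_eq_P (l : List Char) (i : Nat) : pvIdxOk l l.length i = pvIdxOkP l none i := by
  cases i <;> simp [pvIdxOk, pvIdxOkP, pvBneNone, pvBneSome]

lemma pvIdxOkP_shift (a : Char) (l : List Char) (p? : Option Char) (i : Nat) :
    pvIdxOkP (a :: l) p? (i + 1) = pvIdxOkP l (some a) i := by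
  cases i <;> simp [pvIdxOkP, List.getD, BEq.comm]

lemma range_any_eq_recIdx : ∀ (l : List Char) (p? : Option Char),
    (List.range (l.length - 1)).any (pvIdxOkP l p?) = pvRecIdx p? l := by
  intro l
  induction l with
  | nil => intro p?; simp [pvRecIdx]
  | cons a l' ih =>
    intro p?
    cases l' with
    | nil => simp [pvRecIdx]
    | cons b rest =>
      rw [show (a :: b :: rest).length - 1 = rest.length + 1 from by simp,
        List.range_succ_eq_map]
      have hhead : pvIdxOkP (a :: b :: rest) p? 0 =
          ((a == b) && (p? != some a) && (rest.head? != some a)) := by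
        cases rest <;> simp [pvIdxOkP, List.getD] <;> tauto
      have hih := ih (some a)
      rw [show (b :: rest).length - 1 = rest.length from by simp] at hih
      simp only [List.any_cons, List.any_map, Function.comp_def, pvIdxOkP_shift, pvRecIdx]
      rw [hhead, ← hih]

lemma pvRecIdx_cons_self (p : Char) (rest : List Char) :
    pvRecIdx (some p) (p :: rest) = pvRecIdx (some p) rest := by
  cases rest <;> simp [pvRecIdx]

lemma pvLead_eq_one (c : Char) (l : List Char) :
    (pvLead c l == 1) = (match l with
      | [] => false
      | b :: r2 => (b == c) && (r2.head? != some c)) := by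
  cases l with
  | nil => simp [pvLead]
  | cons b r2 =>
    by_cases hb : b = c
    · cases r2 with
      | nil => simp [pvLead, hb]
      | cons d r3 =>
        by_cases hd : d = c <;> simp [pvLead, hb, hd]
    · simp [pvLead, hb]

lemma pvKey (d b : Char) (r2 : List Char) :
    ((1 : Nat) + pvLead d (b :: r2) == 2) = ((d == b) && (r2.head? != some d)) := by
  rw [show ((1 : Nat) + pvLead d (b :: r2) == 2) = (pvLead d (b :: r2) == 1) from by
    cases hp : pvLead d (b :: r2) <;> simp <;> omega]
  rw [pvLead_eq_one, show ((d == b) = (b == d)) from BEq.comm]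

lemma pvLoopA_inv : ∀ (l : List Char) (p : Char) (cnt : Nat),
    pvLoopA l (some p) cnt = ((cnt + pvLead p l == 2) || pvRecIdx (some p) l) := by
  intro l
  induction l with
  | nil => intro p cnt; simp [pvLoopA, pvLead, pvRecIdx]
  | cons d rest ih =>
    intro p cnt
    by_cases h : d = p
    · subst h
      rw [show pvLoopA (d :: rest) (some d) cnt = pvLoopA rest (some d) (cnt + 1) from by
        simp [pvLoopA]]
      rw [ih, pvRecIdx_cons_self, show pvLead d (d :: rest) = pvLead d rest + 1 from by
        simp [pvLead]]
      rw [show cnt + (pvLead d rest + 1) = cnt + 1 + pvLead d rest from by omega]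
    · have hb : (some d == some p) = false := by simp [h]
      rw [show pvLoopA (d :: rest) (some p) cnt =
          (if cnt == 2 then true else pvLoopA rest (some d) 1) from by simp [pvLoopA, hb]]
      rw [show pvLead p (d :: rest) = 0 from by simp [pvLead, h]]
      by_cases h2 : cnt = 2
      · simp [h2]
      · rw [if_neg (by simp [h2]), show (cnt + 0 == 2) = false from by simp [h2],
          Bool.false_or, ih]
        cases rest with
        | nil => simp [pvLead, pvRecIdx]
        | cons b r2 =>
          have hpd : ((some p : Option Char) != some d) = true := by
            simp only [bne_iff_ne, ne_eq, Option.some.injEq]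
            exact fun hh => h hh.symm
          rw [show pvRecIdx (some p) (d :: b :: r2) =
              (((d == b) && ((some p : Option Char) != some d) && (r2.head? != some d)) ||
                pvRecIdx (some d) (b :: r2)) from rfl]
          rw [hpd, Bool.and_true, pvKey]

-- ===== VERDICT (by name: the statement is the Claim_ definition above) =====
theorem has_once_repeating_digit_spec : Claim_equal_has_once_repeating_digit := by
  intro password _
  show pvLoopA password.toList none 0 =
    (List.range (password.toList.length - 1)).any
      (fun i => pvIdxOk password.toList password.toList.length i)
  simp only [pvIdxOk_eq_P]
  rw [show ((fun i => pvIdxOkP password.toList none i) = pvIdxOkP password.toList none) from rfl,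
    range_any_eq_recIdx]
  cases password.toList with
  | nil => simp [pvLoopA, pvRecIdx]
  | cons c rest =>
    rw [show pvLoopA (c :: rest) none 0 = pvLoopA rest (some c) 1 from by simp [pvLoopA],
      pvLoopA_inv]
    cases rest with
    | nil => simp [pvLead, pvRecIdx]
    | cons b r2 =>
      rw [show pvRecIdx none (c :: b :: r2) =
          (((c == b) && ((none : Option Char) != some c) && (r2.head? != some c)) ||
            pvRecIdx (some c) (b :: r2)) from rfl]
      rw [pvBneNone, Bool.and_true, pvKey]
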